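-- pv_equiv track=rewrite | github.com/MrMil/gameoflife-nn | gameoflife.py | get_neighbors_sum
-- ===== SOURCE A (Python) =====
-- BOARD_T = list[list[int]]
--
-- def get_neighbors_sum(board: BOARD_T, y: int, x: int) -> int:
--     up = get_direction(board, "up", y, x)
--     down = get_direction(board, "down", y, x)
--     left = get_direction(board, "left", y, x)
--     right = get_direction(board, "right", y, x)
--     top_right_corner = get_direction(board, "right", *up)
--     top_left_corner = get_direction(board, "left", *up)
--     bottom_right_corner = get_direction(board, "right", *down)
--     bottom_left_corner = get_direction(board, "left", *down)
--     return sum(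
--         [
--             board[i][j]
--             for i, j in [
--                 up,
--                 down,
--                 left,
--                 right,
--                 top_right_corner,
--                 bottom_right_corner,
--                 top_left_corner,
--                 bottom_left_corner,
--             ]
--         ]
--     )
--
-- def get_direction(board: BOARD_T, direction: str, y: int, x: int) -> tuple[int, int]:
--     if direction == "up":
--         return y - 1, x
--     elif direction == "right":
--         return (y, x + 1) if x < len(board[0]) - 1 else (y, 0)
--     elif direction == "down":
--         return (y + 1, x) if y < len(board) - 1 else (0, x)
--     elif direction == "left":
--         return y, x - 1
--     else:
--         raise ValueError("Invalid direction")
-- ===== SOURCE B (Python) =====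
-- def get_neighbors_sum(board, y, x):
--     h, w = len(board), len(board[0])
--     block = sum(board[(y + dy) % h][(x + dx) % w]
--                 for dy in (-1, 0, 1) for dx in (-1, 0, 1))
--     return block - board[y][x]
-- ===== Notes on version B (the rewrite author's own statement) =====
-- stated objective: idiomatic
-- what changed: B uses inclusion-exclusion instead of neighbor enumeration: it sums the whole 3x3 toroidal block around the cell with a uniform (y+dy)%h,(x+dx)%w comprehension and subtracts the center, so the get_direction helper, its edge-wrap branches and the four corner compositions disappear.
-- outside the precondition, e.g. on get_neighbors_sum([[4, 1], [4, 5, 0]], 0, 2): A returns 23, B raises IndexError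
import Mathlib
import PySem

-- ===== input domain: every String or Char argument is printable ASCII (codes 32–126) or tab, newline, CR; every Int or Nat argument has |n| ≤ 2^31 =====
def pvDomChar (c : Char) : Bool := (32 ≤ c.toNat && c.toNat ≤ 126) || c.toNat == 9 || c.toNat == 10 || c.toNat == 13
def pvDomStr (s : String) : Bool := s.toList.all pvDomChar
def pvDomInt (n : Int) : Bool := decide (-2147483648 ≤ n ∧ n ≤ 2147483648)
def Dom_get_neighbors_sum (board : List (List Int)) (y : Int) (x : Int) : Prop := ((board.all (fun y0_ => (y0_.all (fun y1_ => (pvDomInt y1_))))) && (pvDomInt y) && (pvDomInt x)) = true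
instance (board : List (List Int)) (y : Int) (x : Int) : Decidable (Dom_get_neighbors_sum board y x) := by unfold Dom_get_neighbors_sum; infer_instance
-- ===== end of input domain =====

-- B replaces A's 8-neighbor enumeration (get_direction helper, wrap branches, corner
-- compositions) by inclusion-exclusion: sum the whole 3x3 toroidal block with uniform
-- modulo indexing and subtract the center cell (objective: idiomatic; same O(1) cost).

-- ===== PORT A =====
-- board[i][j]; none = IndexError (excluded by Pre_), .getD 0 is never reached there
def pvCellA (board : List (List Int)) (i j : Int) : Int :=
  ((PySem.List.pyGet? board i).bind (fun row => PySem.List.pyGet? row j)).getD 0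

def get_direction (board : List (List Int)) (direction : String) (y : Int) (x : Int) : Int × Int :=
  if direction = "up" then (y - 1, x)
  else if direction = "right" then
    -- len(board[0]): board[0] raises IndexError on an empty board — excluded by Pre_
    (if x < (((PySem.List.pyGet? board 0).getD []).length : Int) - 1 then (y, x + 1) else (y, 0))
  else if direction = "down" then
    (if y < (board.length : Int) - 1 then (y + 1, x) else (0, x))
  else if direction = "left" then (y, x - 1)
  else (0, 0)  -- Python: raise ValueError — unreachable, A only passes the four literal directions

def get_neighbors_sum (board : List (List Int)) (y : Int) (x : Int) : Int :=
  let up := get_direction board "up" y x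
  let down := get_direction board "down" y x
  let left := get_direction board "left" y x
  let right := get_direction board "right" y x
  let top_right_corner := get_direction board "right" up.1 up.2
  let top_left_corner := get_direction board "left" up.1 up.2
  let bottom_right_corner := get_direction board "right" down.1 down.2
  let bottom_left_corner := get_direction board "left" down.1 down.2
  (([up, down, left, right, top_right_corner, bottom_right_corner,
     top_left_corner, bottom_left_corner]).map (fun p => pvCellA board p.1 p.2)).sum

-- ===== PORT B =====
-- board[i][j] with default, same Option reading: none = IndexError, excluded by Pre_
def pvCellB (board : List (List Int)) (i j : Int) : Int :=
  ((PySem.List.pyGet? board i).bind (fun row => PySem.List.pyGet? row j)).getD 0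

def get_neighbors_sum_alt (board : List (List Int)) (y : Int) (x : Int) : Int :=
  let h : Int := (board.length : Int)
  let w : Int := (((PySem.List.pyGet? board 0).getD []).length : Int)
  -- block = sum(board[(y+dy)%h][(x+dx)%w] for dy in (-1,0,1) for dx in (-1,0,1))
  let block := ([(-1 : Int), 0, 1].flatMap (fun dy => [(-1 : Int), 0, 1].map (fun dx =>
      pvCellB board (PySem.Int.mod (y + dy) h) (PySem.Int.mod (x + dx) w)))).sum
  block - pvCellB board y x

-- ===== PRECONDITION & SPEC =====
-- Pre_ excludes empty / zero-width / ragged boards and out-of-range coordinates, on which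
-- A raises IndexError (B raises IndexError or ZeroDivisionError) — except a few ragged
-- boards on which A's returned value is an accident of Python negative-index wraparound
-- while B hits an IndexError (see the cite).
def Pre_get_neighbors_sum (board : List (List Int)) (y : Int) (x : Int) : Prop :=
  0 < board.length ∧
  0 < ((PySem.List.pyGet? board 0).getD []).length ∧
  (∀ r ∈ board, r.length = ((PySem.List.pyGet? board 0).getD []).length) ∧
  1 - (board.length : Int) ≤ y ∧ y ≤ (board.length : Int) - 1 ∧
  1 - (((PySem.List.pyGet? board 0).getD []).length : Int) ≤ x ∧
  x ≤ (((PySem.List.pyGet? board 0).getD []).length : Int) - 1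

instance (board : List (List Int)) (y : Int) (x : Int) : Decidable (Pre_get_neighbors_sum board y x) := by
  unfold Pre_get_neighbors_sum; infer_instance

def pvWitness_get_neighbors_sum : List (List Int) × Int × Int := ([[1, 2], [3, 4]], 0, 0)

def Spec_get_neighbors_sum (board : List (List Int)) (y : Int) (x : Int) (out : Int) : Prop := out = get_neighbors_sum_alt board y x
instance (board : List (List Int)) (y : Int) (x : Int) (out : Int) : Decidable (Spec_get_neighbors_sum board y x out) := by unfold Spec_get_neighbors_sum; infer_instance

-- ===== CLAIM (what is proved, stated in full; the proofs are below) =====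
def Claim_equal_get_neighbors_sum : Prop := ∀ (board : List (List Int)) (y : Int) (x : Int), Dom_get_neighbors_sum board y x → Pre_get_neighbors_sum board y x → Spec_get_neighbors_sum board y x (get_neighbors_sum board y x)

-- ===== LEMMAS AND PROOFS =====

theorem pvCellB_eq (board : List (List Int)) (i j : Int) :
    pvCellB board i j = pvCellA board i j := rfl

-- Python indexing with an index in [-len, len) equals indexing at the Python modulus.
theorem pv_pyGet?_mod {α : Type} (xs : List α) (i : Int)
    (h1 : -(xs.length : Int) ≤ i) (h2 : i < (xs.length : Int)) :
    PySem.List.pyGet? xs i = PySem.List.pyGet? xs (PySem.Int.mod i (xs.length : Int)) := by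
  have hlen : 0 < (xs.length : Int) := by omega
  rw [PySem.Int.mod_eq_emod_of_pos hlen]
  by_cases hi : 0 ≤ i
  · rw [Int.emod_eq_of_lt hi h2]
  · have hshift : (i + (xs.length : Int)) % (xs.length : Int) = i % (xs.length : Int) := by
      simp
    have hmod : i % (xs.length : Int) = i + (xs.length : Int) := by
      rw [← hshift, Int.emod_eq_of_lt (by omega) (by omega)]
    rw [hmod]
    have hk : i = -(((-i).toNat : Nat) : Int) := by omega
    rw [hk, PySem.List.pyGet?_neg_natCast xs (-i).toNat (by omega) (by omega),
        PySem.List.pyGet?_of_nonneg xs (by omega)]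
    congr 1
    omega

-- Python's a % b % b = a % b (positive b)
theorem pv_modmod (a b : Int) (hb : 0 < b) :
    PySem.Int.mod (PySem.Int.mod a b) b = PySem.Int.mod a b := by
  simp only [PySem.Int.mod_eq_emod_of_pos hb]
  exact Int.emod_emod_of_dvd a dvd_rfl

-- two cell reads agree when their raw indices are Python-valid and congruent modulo the sizes
theorem pv_cell_congr (board : List (List Int))
    (hrect : ∀ r ∈ board, r.length = ((PySem.List.pyGet? board 0).getD []).length)
    (i j i' j' : Int)
    (hi1 : -((board.length : Nat) : Int) ≤ i) (hi2 : i < ((board.length : Nat) : Int))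
    (hj1 : -((((PySem.List.pyGet? board 0).getD []).length : Nat) : Int) ≤ j) (hj2 : j < ((((PySem.List.pyGet? board 0).getD []).length : Nat) : Int))
    (hi1' : -((board.length : Nat) : Int) ≤ i') (hi2' : i' < ((board.length : Nat) : Int))
    (hj1' : -((((PySem.List.pyGet? board 0).getD []).length : Nat) : Int) ≤ j') (hj2' : j' < ((((PySem.List.pyGet? board 0).getD []).length : Nat) : Int))
    (hi' : PySem.Int.mod i' ((board.length : Nat) : Int) = PySem.Int.mod i ((board.length : Nat) : Int))
    (hj' : PySem.Int.mod j' ((((PySem.List.pyGet? board 0).getD []).length : Nat) : Int) = PySem.Int.mod j ((((PySem.List.pyGet? board 0).getD []).length : Nat) : Int)) :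
    pvCellA board i j = pvCellA board i' j' := by
  unfold pvCellA
  rw [pv_pyGet?_mod board i hi1 hi2, pv_pyGet?_mod board i' hi1' hi2', hi']
  cases hrow : PySem.List.pyGet? board (PySem.Int.mod i ((board.length : Nat) : Int)) with
  | none => rfl
  | some row =>
    have hmem : row ∈ board := PySem.List.mem_of_pyGet?_eq_some board hrow
    have hlen : row.length = ((PySem.List.pyGet? board 0).getD []).length := hrect row hmem
    simp only [Option.bind_some]
    rw [pv_pyGet?_mod row j (by omega) (by omega), pv_pyGet?_mod row j' (by omega) (by omega),
        show ((row.length : Nat) : Int) = ((((PySem.List.pyGet? board 0).getD []).length : Nat) : Int) from by rw [hlen], hj']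

-- a valid raw cell read equals the read at the Python moduli of its indices
theorem pv_cell_to_mod (board : List (List Int))
    (hrect : ∀ r ∈ board, r.length = ((PySem.List.pyGet? board 0).getD []).length)
    (i j : Int)
    (hi1 : -((board.length : Nat) : Int) ≤ i) (hi2 : i < ((board.length : Nat) : Int))
    (hj1 : -((((PySem.List.pyGet? board 0).getD []).length : Nat) : Int) ≤ j) (hj2 : j < ((((PySem.List.pyGet? board 0).getD []).length : Nat) : Int)) :
    pvCellA board i j =
      pvCellA board (PySem.Int.mod i ((board.length : Nat) : Int))
        (PySem.Int.mod j ((((PySem.List.pyGet? board 0).getD []).length : Nat) : Int)) := by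
  have hH : (0 : Int) < ((board.length : Nat) : Int) := by omega
  have hW : (0 : Int) < ((((PySem.List.pyGet? board 0).getD []).length : Nat) : Int) := by omega
  exact (pv_cell_congr board hrect
    (PySem.Int.mod i ((board.length : Nat) : Int))
    (PySem.Int.mod j ((((PySem.List.pyGet? board 0).getD []).length : Nat) : Int)) i j
    (by have := PySem.Int.mod_nonneg i hH; omega) (PySem.Int.mod_lt i hH)
    (by have := PySem.Int.mod_nonneg j hW; omega) (PySem.Int.mod_lt j hW)
    hi1 hi2 hj1 hj2
    (pv_modmod i _ hH).symm (pv_modmod j _ hW).symm).symm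

-- ===== VERDICT (by name: the statement is the Claim_ definition above) =====
theorem get_neighbors_sum_spec : Claim_equal_get_neighbors_sum := by
  unfold Claim_equal_get_neighbors_sum Spec_get_neighbors_sum
  intro board y x _hdom hpre
  obtain ⟨hH, hW, hrect, hy1, hy2, hx1, hx2⟩ := hpre
  simp only [get_neighbors_sum, get_neighbors_sum_alt, get_direction, pvCellB_eq,
    String.reduceEq, if_true, if_false, List.flatMap_cons, List.flatMap_nil,
    List.map_cons, List.map_nil, List.sum_cons, List.sum_nil, List.append_nil,
    List.cons_append, List.nil_append, add_zero]
  have hYw : ¬ y < ((board.length : Nat) : Int) - 1 → PySem.Int.mod (y + 1) ((board.length : Nat) : Int) = PySem.Int.mod 0 ((board.length : Nat) : Int) := by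
    intro h
    rw [PySem.Int.mod_eq_emod_of_pos (by omega), PySem.Int.mod_eq_emod_of_pos (by omega),
        show y + 1 = ((board.length : Nat) : Int) from by omega, Int.emod_self, Int.zero_emod]
  have hXw : ¬ x < ((((PySem.List.pyGet? board 0).getD []).length : Nat) : Int) - 1 → PySem.Int.mod (x + 1) ((((PySem.List.pyGet? board 0).getD []).length : Nat) : Int) = PySem.Int.mod 0 ((((PySem.List.pyGet? board 0).getD []).length : Nat) : Int) := by
    intro h
    rw [PySem.Int.mod_eq_emod_of_pos (by omega), PySem.Int.mod_eq_emod_of_pos (by omega),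
        show x + 1 = ((((PySem.List.pyGet? board 0).getD []).length : Nat) : Int) from by omega, Int.emod_self, Int.zero_emod]
  have K := pv_cell_to_mod board hrect
  by_cases hYc : y < ((board.length : Nat) : Int) - 1 <;>
    by_cases hXc : x < ((((PySem.List.pyGet? board 0).getD []).length : Nat) : Int) - 1 <;>
      simp only [hYc, hXc, if_true, if_false]
  · rw [K (y-1) x (by omega) (by omega) (by omega) (by omega),
        K (y+1) x (by omega) (by omega) (by omega) (by omega),
        K y (x-1) (by omega) (by omega) (by omega) (by omega),
        K y (x+1) (by omega) (by omega) (by omega) (by omega),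
        K (y-1) (x+1) (by omega) (by omega) (by omega) (by omega),
        K (y+1) (x+1) (by omega) (by omega) (by omega) (by omega),
        K (y-1) (x-1) (by omega) (by omega) (by omega) (by omega),
        K (y+1) (x-1) (by omega) (by omega) (by omega) (by omega),
        K y x (by omega) (by omega) (by omega) (by omega),
        show y + -1 = y - 1 from by ring, show x + -1 = x - 1 from by ring]
    ring
  · rw [K (y-1) x (by omega) (by omega) (by omega) (by omega),
        K (y+1) x (by omega) (by omega) (by omega) (by omega),
        K y (x-1) (by omega) (by omega) (by omega) (by omega),
        K y 0 (by omega) (by omega) (by omega) (by omega),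
        K (y-1) 0 (by omega) (by omega) (by omega) (by omega),
        K (y+1) 0 (by omega) (by omega) (by omega) (by omega),
        K (y-1) (x-1) (by omega) (by omega) (by omega) (by omega),
        K (y+1) (x-1) (by omega) (by omega) (by omega) (by omega),
        K y x (by omega) (by omega) (by omega) (by omega),
        show y + -1 = y - 1 from by ring, show x + -1 = x - 1 from by ring,
        hXw hXc]
    ring
  · rw [K (y-1) x (by omega) (by omega) (by omega) (by omega),
        K 0 x (by omega) (by omega) (by omega) (by omega),
        K y (x-1) (by omega) (by omega) (by omega) (by omega),
        K y (x+1) (by omega) (by omega) (by omega) (by omega),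
        K (y-1) (x+1) (by omega) (by omega) (by omega) (by omega),
        K 0 (x+1) (by omega) (by omega) (by omega) (by omega),
        K (y-1) (x-1) (by omega) (by omega) (by omega) (by omega),
        K 0 (x-1) (by omega) (by omega) (by omega) (by omega),
        K y x (by omega) (by omega) (by omega) (by omega),
        show y + -1 = y - 1 from by ring, show x + -1 = x - 1 from by ring,
        hYw hYc]
    ring
  · rw [K (y-1) x (by omega) (by omega) (by omega) (by omega),
        K 0 x (by omega) (by omega) (by omega) (by omega),
        K y (x-1) (by omega) (by omega) (by omega) (by omega),
        K y 0 (by omega) (by omega) (by omega) (by omega),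
        K (y-1) 0 (by omega) (by omega) (by omega) (by omega),
        K 0 0 (by omega) (by omega) (by omega) (by omega),
        K (y-1) (x-1) (by omega) (by omega) (by omega) (by omega),
        K 0 (x-1) (by omega) (by omega) (by omega) (by omega),
        K y x (by omega) (by omega) (by omega) (by omega),
        show y + -1 = y - 1 from by ring, show x + -1 = x - 1 from by ring,
        hYw hYc, hXw hXc]
    ring
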